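-- pv_equiv track=rewrite | github.com/akshatg20/sql-parser | index.py | index_graduation_year
-- ===== SOURCE A (Python) =====
-- def index_graduation_year(years_with_ids):
--     """
--     Sorts the graduation years and returns three things:
--     1. A list of student IDs sorted by graduation year.
--     2. A dictionary where the keys are unique graduation years and the values are the start index of the corresponding year in the sorted list.
--     3. A dictionary where the keys are unique graduation years and the values are the last occurrence (end index) of the corresponding year in the sorted list.
--
--     This method can be used to create an index on graduation year for a list of students.
--
--     :param years_with_ids: List of tuples in the form (graduation_year, student_id)
--     :return: sorted_ids, year_start_index, year_end_index
--     """
--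
--     # Sort the list of tuples based on the graduation year (first element of the tuple)
--     sorted_years_with_ids = sorted(years_with_ids, key=lambda x: x[0])
--
--     # Extract the sorted IDs
--     sorted_ids = [item[1] for item in sorted_years_with_ids]
--
--     # Create dictionaries to track the start and end index of each unique graduation year
--     year_start_index = {}
--     year_end_index = {}
--
--     for i, (year, _) in enumerate(sorted_years_with_ids):
--         # Record the first occurrence of the graduation year
--         if year not in year_start_index:
--             year_start_index[year] = i
--
--         # Always update the end index with the current occurrence
--         year_end_index[year] = i
--
--     return sorted_ids, year_start_index, year_end_index
-- ===== SOURCE B (Python) =====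
-- def index_graduation_year(years_with_ids):
--     # Sort by year (stable, same key as A), then index whole runs of equal
--     # years with two pointers instead of per-element dict updates.
--     srt = sorted(years_with_ids, key=lambda x: x[0])
--     sorted_ids = [sid for _, sid in srt]
--     year_start_index = {}
--     year_end_index = {}
--     n = len(srt)
--     i = 0
--     while i < n:
--         year = srt[i][0]
--         j = i + 1
--         while j < n and srt[j][0] == year:
--             j += 1
--         year_start_index[year] = i
--         year_end_index[year] = j - 1
--         i = j
--     return sorted_ids, year_start_index, year_end_index
-- ===== Notes on version B (the rewrite author's own statement) =====
-- stated objective: alternative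
-- what changed: Replaces A's per-element enumerate loop (membership test for the start dict, overwrite of the end dict on every element) with a two-pointer run scan over the sorted list that inserts each year's start and end index exactly once per run of equal years.
import Mathlib
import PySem

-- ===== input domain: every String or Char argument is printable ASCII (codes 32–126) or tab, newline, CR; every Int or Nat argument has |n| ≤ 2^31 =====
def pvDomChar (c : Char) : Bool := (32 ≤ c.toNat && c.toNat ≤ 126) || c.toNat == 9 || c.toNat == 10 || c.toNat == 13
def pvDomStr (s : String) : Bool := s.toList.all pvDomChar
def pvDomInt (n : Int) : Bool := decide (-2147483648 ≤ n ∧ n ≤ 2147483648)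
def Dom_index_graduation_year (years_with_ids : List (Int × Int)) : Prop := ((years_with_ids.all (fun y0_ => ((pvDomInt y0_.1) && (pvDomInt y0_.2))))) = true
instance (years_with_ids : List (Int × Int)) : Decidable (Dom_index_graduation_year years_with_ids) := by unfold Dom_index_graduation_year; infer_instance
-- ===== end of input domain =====

-- B replaces A's per-element enumerate loop (membership test + end-index overwrite on
-- every element) with a two-pointer scan over runs of equal years, inserting each
-- year's start and end index exactly once per run (objective: alternative).


-- ===== PORT A =====
-- one iteration of A's `for i, (year, _) in enumerate(...)` loop over the pair of dicts
def stepA (acc : PySem.Dict Int Int × PySem.Dict Int Int) (p : Int × (Int × Int)) :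
    PySem.Dict Int Int × PySem.Dict Int Int :=
  ((if acc.1.contains p.2.1 then acc.1 else acc.1.insert p.2.1 p.1), acc.2.insert p.2.1 p.1)

def index_graduation_year (years_with_ids : List (Int × Int)) :
    List Int × (List (Int × Int)) × (List (Int × Int)) :=
  let sorted_years_with_ids := PySem.List.sorted years_with_ids (fun x => x.1) false
  let sorted_ids := sorted_years_with_ids.map (fun item => item.2)
  let r := (PySem.List.enumerate sorted_years_with_ids 0).foldl stepA
    (PySem.Dict.empty, PySem.Dict.empty)
  (sorted_ids, r.1.items, r.2.items)

-- ===== PORT B =====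
-- B's outer `while i < n` loop: scan the run of the head's year with the inner
-- while (takeWhile/dropWhile), record start = i and end = j-1 once, jump to j.
def runLoopB : List (Int × Int) → Int → PySem.Dict Int Int → PySem.Dict Int Int →
    PySem.Dict Int Int × PySem.Dict Int Int
  | [], _, ds, de => (ds, de)
  | (y, _) :: rest, i, ds, de =>
    let run := rest.takeWhile (fun q => q.1 == y)
    let rest' := rest.dropWhile (fun q => q.1 == y)
    runLoopB rest' (i + 1 + run.length) (ds.insert y i) (de.insert y (i + run.length))
termination_by l => l.length
decreasing_by
  simpa using Nat.lt_succ_of_le (List.length_dropWhile_le _ _)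

def index_graduation_year_alt (years_with_ids : List (Int × Int)) :
    List Int × (List (Int × Int)) × (List (Int × Int)) :=
  let srt := PySem.List.sorted years_with_ids (fun x => x.1) false
  let sorted_ids := srt.map (fun item => item.2)
  let r := runLoopB srt 0 PySem.Dict.empty PySem.Dict.empty
  (sorted_ids, r.1.items, r.2.items)

-- ===== PRECONDITION & SPEC =====
def Spec_index_graduation_year (years_with_ids : List (Int × Int)) (out : List Int × (List (Int × Int)) × (List (Int × Int))) : Prop := out = index_graduation_year_alt years_with_ids
instance (years_with_ids : List (Int × Int)) (out : List Int × (List (Int × Int)) × (List (Int × Int))) : Decidable (Spec_index_graduation_year years_with_ids out) := by unfold Spec_index_graduation_year; infer_instance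

-- ===== CLAIM (what is proved, stated in full; the proofs are below) =====
def Claim_equal_index_graduation_year : Prop := ∀ (years_with_ids : List (Int × Int)), Dom_index_graduation_year years_with_ids → Spec_index_graduation_year years_with_ids (index_graduation_year years_with_ids)

-- ===== LEMMAS AND PROOFS =====

-- overwriting a freshly appended key keeps its position: one insert suffices
theorem insert_insert_same (d : PySem.Dict Int Int) (y a b : Int)
    (h : d.contains y = false) : (d.insert y a).insert y b = d.insert y b := by
  have hmem : ∀ p ∈ d.items, (p.1 == y) = false := by
    intro p hp
    by_contra hne
    have : p.1 = y := by simpa using hne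
    have : d.contains y = true := by
      rw [PySem.Dict.contains_iff_mem_keys]
      exact this ▸ PySem.Dict.mem_keys_of_mem_items d hp
    simp [h] at this
  apply PySem.Dict.ext
  rw [PySem.Dict.items_insert_of_contains (d.insert y a) b (PySem.Dict.contains_insert_self d y a),
      PySem.Dict.items_insert_of_not_contains d a h,
      PySem.Dict.items_insert_of_not_contains d b h]
  rw [List.map_append]
  congr 1
  · have he : ∀ p ∈ d.items, (if (p.1 == y) = true then (y, b) else p) = p := by
      intro p hp; simp [hmem p hp]
    rw [List.map_congr_left he, List.map_id']
  · simp

-- folding A's step over a run of equal years only moves the end index forward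
theorem runFold (y : Int) : ∀ (run : List (Int × Int)) (j a : Int)
    (ds de : PySem.Dict Int Int),
    (∀ p ∈ run, p.1 = y) → ds.contains y = true → de.contains y = false →
    (PySem.List.enumerate run j).foldl stepA (ds, de.insert y a) =
      (ds, de.insert y (if run.isEmpty then a else j + (run.length : Int) - 1)) := by
  intro run
  induction run with
  | nil => intro j a ds de _ _ _; simp [PySem.List.enumerate_nil]
  | cons q t ih =>
    intro j a ds de hall hds hde
    have hy : q.1 = y := hall q (by simp)
    rw [PySem.List.enumerate_cons, List.foldl_cons]
    have h1 : stepA (ds, de.insert y a) (j, q) = (ds, de.insert y j) := by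
      simp [stepA, hy, hds, insert_insert_same de y a j hde]
    rw [h1, ih (j + 1) j ds de (fun p hp => hall p (by simp [hp])) hds hde]
    congr 1
    rcases t with _ | ⟨w, t'⟩
    · simp
    · simp only [List.isEmpty_cons, List.length_cons, Bool.false_eq_true, if_false]
      congr 1
      push_cast
      ring

-- after dropping the head's run from a key-sorted list, the head's key is gone
theorem dropWhile_key_ne (y : Int) : ∀ (l : List (Int × Int)),
    l.Pairwise (fun a b => a.1 ≤ b.1) → (∀ p ∈ l, y ≤ p.1) →
    ∀ p ∈ l.dropWhile (fun q => q.1 == y), p.1 ≠ y := by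
  intro l
  induction l with
  | nil => simp
  | cons q t ih =>
    intro hpw hle p hp
    rw [List.dropWhile_cons] at hp
    by_cases hq : (q.1 == y) = true
    · rw [if_pos hq] at hp
      exact ih (List.pairwise_cons.mp hpw).2 (fun r hr => hle r (by simp [hr])) p hp
    · rw [if_neg hq] at hp
      have hqy : q.1 ≠ y := by simpa using hq
      have hqge : y ≤ q.1 := hle q (by simp)
      rcases List.mem_cons.mp hp with rfl | hpt
      · exact hqy
      · have hq1 := (List.pairwise_cons.mp hpw).1 p hpt
        omega

-- main loop correspondence on a key-sorted list with fresh keys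
theorem foldA_eq_runLoopB : ∀ (n : Nat) (s : List (Int × Int)) (i : Int)
    (ds de : PySem.Dict Int Int), s.length ≤ n →
    s.Pairwise (fun a b => a.1 ≤ b.1) →
    (∀ p ∈ s, ds.contains p.1 = false) → (∀ p ∈ s, de.contains p.1 = false) →
    (PySem.List.enumerate s i).foldl stepA (ds, de) = runLoopB s i ds de := by
  intro n
  induction n with
  | zero =>
    intro s i ds de hlen _ _ _
    have hs : s = [] := List.eq_nil_of_length_eq_zero (Nat.le_zero.mp hlen)
    subst hs
    simp [PySem.List.enumerate_nil, runLoopB]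
  | succ n ih =>
    intro s i ds de hlen hpw hds hde
    rcases s with _ | ⟨⟨y, v⟩, rest⟩
    · simp [PySem.List.enumerate_nil, runLoopB]
    · have hsplit : rest = rest.takeWhile (fun q => q.1 == y) ++ rest.dropWhile (fun q => q.1 == y) :=
        (List.takeWhile_append_dropWhile).symm
      have hrunkey : ∀ p ∈ rest.takeWhile (fun q => q.1 == y), p.1 = y := by
        intro p hp
        have := List.mem_takeWhile_imp hp
        simpa using this
      have hrestle : ∀ p ∈ rest, y ≤ p.1 := (List.pairwise_cons.mp hpw).1
      have hpwrest : rest.Pairwise (fun a b => a.1 ≤ b.1) := (List.pairwise_cons.mp hpw).2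
      have hne : ∀ p ∈ rest.dropWhile (fun q => q.1 == y), p.1 ≠ y :=
        dropWhile_key_ne y rest hpwrest hrestle
      have hsub : rest.dropWhile (fun q => q.1 == y) ⊆ rest :=
        (List.dropWhile_sublist _).subset
      rw [PySem.List.enumerate_cons, List.foldl_cons]
      have h1 : stepA (ds, de) (i, (y, v)) = (ds.insert y i, de.insert y i) := by
        simp [stepA, hds (y, v) (by simp)]
      rw [h1]
      conv_lhs => rw [hsplit]
      rw [PySem.List.enumerate_append, List.foldl_append]
      rw [runFold y (rest.takeWhile (fun q => q.1 == y)) (i + 1) i (ds.insert y i) de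
        hrunkey (PySem.Dict.contains_insert_self ds y i) (hde (y, v) (by simp))]
      have hif : (if (rest.takeWhile (fun q => q.1 == y)).isEmpty then i
          else i + 1 + ((rest.takeWhile (fun q => q.1 == y)).length : Int) - 1) =
          i + ((rest.takeWhile (fun q => q.1 == y)).length : Int) := by
        rcases hkw : rest.takeWhile (fun q => q.1 == y) with _ | ⟨w, t'⟩
        · rw [hkw]; simp
        · rw [hkw]
          simp only [List.isEmpty_cons, List.length_cons, Bool.false_eq_true, if_false]
          push_cast
          ring
      rw [hif]
      rw [ih (rest.dropWhile (fun q => q.1 == y)) (i + 1 + ((rest.takeWhile (fun q => q.1 == y)).length : Int))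
        (ds.insert y i) (de.insert y (i + ((rest.takeWhile (fun q => q.1 == y)).length : Int)))
        (by
          have := List.length_dropWhile_le (fun q => q.1 == y) rest
          simp only [List.length_cons] at hlen
          omega)
        (List.Pairwise.sublist (List.dropWhile_sublist _) hpwrest)
        (by
          intro p hp
          rw [PySem.Dict.contains_insert]
          simp [hne p hp, hds p (by simp [hsub hp])])
        (by
          intro p hp
          rw [PySem.Dict.contains_insert]
          simp [hne p hp, hde p (by simp [hsub hp])])]
      conv_rhs => rw [runLoopB]

-- ===== VERDICT (by name: the statement is the Claim_ definition above) =====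
theorem index_graduation_year_spec : Claim_equal_index_graduation_year := by
  intro xs _
  unfold Spec_index_graduation_year index_graduation_year index_graduation_year_alt
  simp only
  rw [foldA_eq_runLoopB (PySem.List.sorted xs (fun x => x.1) false).length _ _ _ _ le_rfl
    (PySem.List.sorted_pairwise _ _) (by intro p _; simp [PySem.Dict.contains_empty])
    (by intro p _; simp [PySem.Dict.contains_empty])]
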